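-- pv_equiv track=rewrite | github.com/HaShira-Lab/torah-phonetic-architecture | src/analyses/layer_c/layer_c_window_density.py | build_stream
-- ===== SOURCE A (Python) =====
-- VOWELS = set("aeiou")
--
-- DIGRAPHS = ["sh","ts","kh"]
--
-- def tokenize(text):
--     tokens=[]
--     i=0
--     while i<len(text):
--         if text[i] in [" ","|"]:
--             i+=1; continue
--         if i+1<len(text) and text[i:i+2] in DIGRAPHS:
--             tokens.append(text[i:i+2]); i+=2
--         else:
--             tokens.append(text[i]); i+=1
--     return tokens
--
-- def is_vowel(t):
--     return any(c in VOWELS for c in t)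
--
-- def build_stream(text, mode="permissive"):
--     tokens = tokenize(text)
--     stream=[]
--     prev_c=None
--
--     for i in range(len(tokens)):
--         t=tokens[i]
--
--         if is_vowel(t):
--             j=i+1; cons=[]
--             while j<len(tokens):
--                 if is_vowel(tokens[j]): break
--                 cons.append(tokens[j]); j+=1
--
--             if cons:
--                 stream.append(t+"".join(cons))
--             elif mode=="permissive" and prev_c:
--                 stream.append(prev_c+t)
--         else:
--             prev_c=t
--
--     return stream
-- ===== SOURCE B (Python) =====
-- VOWELS = set("aeiou")
--
-- DIGRAPHS = ["sh","ts","kh"]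
--
-- def tokenize(text):
--     tokens=[]
--     i=0
--     while i<len(text):
--         if text[i] in [" ","|"]:
--             i+=1; continue
--         if i+1<len(text) and text[i:i+2] in DIGRAPHS:
--             tokens.append(text[i:i+2]); i+=2
--         else:
--             tokens.append(text[i]); i+=1
--     return tokens
--
-- def is_vowel(t):
--     return any(c in VOWELS for c in t)
--
-- def _flush(stream, mode, pending, cons, snap):
--     if pending is not None:
--         if cons:
--             stream.append(pending + "".join(cons))
--         elif mode == "permissive" and snap:
--             stream.append(snap + pending)
--
-- def build_stream(text, mode="permissive"):
--     # single flat pass: state machine with a pending vowel, its consonant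
--     # cluster, the running previous consonant and its snapshot at the vowel
--     stream = []
--     pending = None
--     cons = []
--     prev_c = None
--     snap = None
--     for t in tokenize(text):
--         if is_vowel(t):
--             _flush(stream, mode, pending, cons, snap)
--             pending = t
--             cons = []
--             snap = prev_c
--         else:
--             cons.append(t)
--             prev_c = t
--     _flush(stream, mode, pending, cons, snap)
--     return stream
-- ===== Notes on version B (the rewrite author's own statement) =====
-- stated objective: alternative
-- what changed: Replaced the outer-for/inner-while lookahead scan (each vowel re-scans forward for its consonant run and the stream is filled at the vowel) by a single flat state-machine pass that accumulates the consonant cluster as it goes and flushes the pending vowel at the next vowel or at the end, snapshotting prev_c at the vowel.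
import Mathlib
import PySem

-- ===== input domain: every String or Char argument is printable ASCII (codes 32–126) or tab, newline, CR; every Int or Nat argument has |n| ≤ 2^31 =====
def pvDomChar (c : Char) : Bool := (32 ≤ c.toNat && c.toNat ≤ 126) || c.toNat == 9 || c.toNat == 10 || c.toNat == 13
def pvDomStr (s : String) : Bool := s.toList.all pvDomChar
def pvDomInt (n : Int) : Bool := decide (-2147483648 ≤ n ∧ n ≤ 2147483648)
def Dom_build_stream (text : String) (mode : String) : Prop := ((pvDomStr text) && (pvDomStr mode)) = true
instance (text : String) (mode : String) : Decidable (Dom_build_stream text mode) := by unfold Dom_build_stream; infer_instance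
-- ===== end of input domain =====

-- B replaces A's outer-for/inner-while nested scan by one flat state-machine pass
-- (pending vowel, accumulated consonant cluster, snapshot of the previous consonant);
-- objective: alternative single-pass decomposition, same results.

-- ===== PORT A =====
-- shared helper: tokenize (identical in A and B, ported once)
def tokenizeLoop : List Char → List String
  | [] => []
  | [c] => if c = ' ' || c = '|' then [] else [String.ofList [c]]
  | c :: c2 :: rest =>
    if c = ' ' || c = '|' then tokenizeLoop (c2 :: rest)
    else if (String.ofList [c, c2]) ∈ (["sh", "ts", "kh"] : List String) then
      String.ofList [c, c2] :: tokenizeLoop rest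
    else String.ofList [c] :: tokenizeLoop (c2 :: rest)

def tokenize (text : String) : List String := tokenizeLoop text.toList

-- shared helper: is_vowel (identical in A and B)
def is_vowel (t : String) : Bool := t.toList.any (fun c => c ∈ (['a','e','i','o','u'] : List Char))

-- Python truthiness of `prev_c` (None or a string)
def optTruthy (p : Option String) : Bool := match p with | none => false | some s => s != ""

-- A's inner while loop: collect consonants from position j until the next vowel
def scanCons : List String → List String
  | [] => []
  | t :: rest => if is_vowel t then [] else t :: scanCons rest

-- A's outer for loop over the remaining tokens, state (prev_c); stream built by appending
def buildLoopA (mode : String) : List String → Option String → List String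
  | [], _ => []
  | t :: rest, prev =>
    if is_vowel t then
      (let cons := scanCons rest
       if !cons.isEmpty then [t ++ String.join cons]
       else if mode == "permissive" && optTruthy prev then [prev.getD "" ++ t]
       else []) ++ buildLoopA mode rest prev
    else buildLoopA mode rest (some t)

def build_stream (text : String) (mode : String) : List String :=
  buildLoopA mode (tokenize text) none

-- ===== PORT B =====
-- B's _flush: emit the pending vowel with its cluster (or snapshot consonant)
def flushPending (mode : String) (pending : Option String) (cons : List String)
    (snap : Option String) : List String :=
  match pending with
  | none => []
  | some v =>
    if !cons.isEmpty then [v ++ String.join cons]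
    else if mode == "permissive" && optTruthy snap then [snap.getD "" ++ v]
    else []

-- B's loop body; state = (stream, pending, cons, prev_c, snap)
def stepB (mode : String)
    (st : List String × Option String × List String × Option String × Option String)
    (t : String) : List String × Option String × List String × Option String × Option String :=
  match st with
  | (out, pending, cons, prevc, snap) =>
    if is_vowel t then (out ++ flushPending mode pending cons snap, some t, [], prevc, prevc)
    else (out, pending, cons ++ [t], some t, snap)

def build_stream_alt (text : String) (mode : String) : List String :=
  match (tokenize text).foldl (stepB mode) ([], none, [], none, none) with
  | (out, pending, cons, _, snap) => out ++ flushPending mode pending cons snap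

-- ===== PRECONDITION & SPEC =====
def Spec_build_stream (text : String) (mode : String) (out : List String) : Prop := out = build_stream_alt text mode
instance (text : String) (mode : String) (out : List String) : Decidable (Spec_build_stream text mode out) := by unfold Spec_build_stream; infer_instance

-- ===== CLAIM (what is proved, stated in full; the proofs are below) =====
def Claim_equal_build_stream : Prop := ∀ (text : String) (mode : String), Dom_build_stream text mode → Spec_build_stream text mode (build_stream text mode)

-- ===== LEMMAS AND PROOFS =====

-- Invariant: running B's fold from any state and then flushing equals the already
-- emitted output, plus the pending vowel flushed with its cluster completed by the
-- upcoming consonant run, plus A's loop over the remaining tokens.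
theorem stepB_invariant (mode : String) (toks : List String) :
    ∀ (out : List String) (pending : Option String) (cons : List String)
      (prevc snap : Option String),
    (match toks.foldl (stepB mode) (out, pending, cons, prevc, snap) with
     | (o, p, c, _, s) => o ++ flushPending mode p c s)
    = out ++ flushPending mode pending (cons ++ scanCons toks) snap ++ buildLoopA mode toks prevc := by
  induction toks with
  | nil => intro out pending cons prevc snap; simp [scanCons, buildLoopA]
  | cons t rest ih =>
    intro out pending cons prevc snap
    by_cases h : is_vowel t = true
    · simp only [List.foldl_cons, stepB, h, if_true, ih, scanCons, buildLoopA]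
      simp [flushPending, List.append_assoc]
    · have h' : is_vowel t = false := by simpa using h
      simp only [List.foldl_cons, stepB, h', Bool.false_eq_true, if_false, ih, scanCons, buildLoopA]
      simp [List.append_assoc]

-- ===== VERDICT (by name: the statement is the Claim_ definition above) =====
theorem build_stream_spec : Claim_equal_build_stream := by
  intro text mode _
  unfold Spec_build_stream build_stream build_stream_alt
  rw [stepB_invariant]
  simp [flushPending]
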